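-- pv_equiv track=rewrite | github.com/LightPotatoDev/baekjoon | math/wrongSieve.py | wrongSieve
-- ===== SOURCE A (Python) =====
-- def wrongSieve(n):
--     iter = [0]*(n+1)
--     counting = [0]*(n+1)
--
--     for i in range(1,n+1):
--         for j in range(1,n+1,i):
--             iter[j] += 1
--
--     for i in range(1,n+1):
--         counting[i] = iter.count(i)
--     return iter
-- ===== SOURCE B (Python) =====
-- def _divcount(m):
--     c = 0
--     i = 1
--     while i * i <= m:
--         if m % i == 0:
--             c += 1 if i * i == m else 2
--         i += 1
--     return c
--
--
-- def wrongSieve(n):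
--     if n < 1:
--         return [0] * (n + 1)
--     return [0, n] + [_divcount(m) for m in range(1, n)]
-- ===== Notes on version B (the rewrite author's own statement) =====
-- stated objective: faster
-- what changed: Replaces the mark-multiples sieve plus the dead quadratic counting loop with per-index trial division up to the square root: each entry is computed directly as a divisor count of its predecessor index.
import Mathlib
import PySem

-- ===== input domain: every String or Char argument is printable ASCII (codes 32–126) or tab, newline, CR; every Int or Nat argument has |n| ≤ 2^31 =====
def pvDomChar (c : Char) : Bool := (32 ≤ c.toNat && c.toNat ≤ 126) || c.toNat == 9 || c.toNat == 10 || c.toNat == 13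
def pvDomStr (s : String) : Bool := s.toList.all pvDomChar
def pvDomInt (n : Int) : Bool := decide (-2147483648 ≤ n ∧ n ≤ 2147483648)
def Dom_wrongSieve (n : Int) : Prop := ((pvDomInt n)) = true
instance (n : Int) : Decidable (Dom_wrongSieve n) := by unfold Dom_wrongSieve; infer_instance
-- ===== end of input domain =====

-- B replaces A's mark-multiples sieve and its dead quadratic counting loop by per-index
-- trial division up to the square root (each entry is a divisor count), measurably faster.

-- ===== PORT A =====
def wrongSieve (n : Int) : List Int :=
  let iter0 : List Int := List.replicate (n + 1).toNat 0
  let counting0 : List Int := List.replicate (n + 1).toNat 0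
  let iter :=
    (PySem.List.pyRange 1 (n + 1) 1).foldl
      (fun it i =>
        (PySem.List.pyRange 1 (n + 1) i).foldl
          (fun it2 j => PySem.List.pySetD it2 j (PySem.List.pyGetD it2 j 0 + 1)) it)
      iter0
  -- the 'counting' loop of A: computed and then discarded, exactly as in A
  let _counting :=
    (PySem.List.pyRange 1 (n + 1) 1).foldl
      (fun c i => PySem.List.pySetD c i ((PySem.List.count iter i : Nat) : Int)) counting0
  iter

-- ===== PORT B =====
-- _divcount is only ever called with m ≥ 1 (m from range(1, n)), so Nat `%` agrees with Python's.
def divcountLoop (m i : Nat) (c : Int) : Int :=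
  if h : i * i ≤ m then
    divcountLoop m (i + 1) (if m % i = 0 then c + (if i * i = m then 1 else 2) else c)
  else c
termination_by m + 1 - i
decreasing_by
  rcases Nat.eq_zero_or_pos i with h0 | hp
  · omega
  · have h2 : i ≤ i * i := Nat.le_mul_of_pos_left i hp
    omega

def wrongSieve_alt (n : Int) : List Int :=
  if n < 1 then List.replicate (n + 1).toNat 0
  else [0, n] ++ (List.range' 1 (n - 1).toNat).map (fun m => divcountLoop m 1 0)

-- ===== PRECONDITION & SPEC =====
def Spec_wrongSieve (n : Int) (out : List Int) : Prop := out = wrongSieve_alt n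
instance (n : Int) (out : List Int) : Decidable (Spec_wrongSieve n out) := by unfold Spec_wrongSieve; infer_instance

-- ===== CLAIM (what is proved, stated in full; the proofs are below) =====
def Claim_equal_wrongSieve : Prop := ∀ (n : Int), Dom_wrongSieve n → Spec_wrongSieve n (wrongSieve n)

-- ===== LEMMAS AND PROOFS =====

-- the inner-loop body of A's sieve
def pvInc (l : List Int) (j : Int) : List Int :=
  PySem.List.pySetD l j (PySem.List.pyGetD l j 0 + 1)

theorem pvInc_length (l : List Int) (j : Int) : (pvInc l j).length = l.length := by
  simp [pvInc, PySem.List.length_pySetD]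

theorem foldl_pvInc_length (S : List Int) (l : List Int) :
    (S.foldl pvInc l).length = l.length := by
  induction S generalizing l with
  | nil => rfl
  | cons j S ih => simp [List.foldl_cons, ih, pvInc_length]

theorem getD_foldl_pvInc (S : List Int) (l : List Int)
    (hS : ∀ j ∈ S, 0 ≤ j ∧ j.toNat < l.length) (k : Nat) (hk : k < l.length) :
    (S.foldl pvInc l).getD k 0 = l.getD k 0 + (S.count (k : Int) : Int) := by
  induction S generalizing l with
  | nil => simp
  | cons j S ih =>
    obtain ⟨hj0, hjl⟩ := hS j (by simp)
    have hlen : (pvInc l j).length = l.length := pvInc_length l j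
    rw [List.foldl_cons, ih (pvInc l j) (fun x hx => by rw [hlen]; exact hS x (by simp [hx]))
        (by omega)]
    have hset : pvInc l j = l.set j.toNat (l.getD j.toNat 0 + 1) := by
      simp [pvInc, PySem.List.pySetD_of_nonneg _ _ hj0, PySem.List.pyGetD_of_nonneg _ _ hj0]
    by_cases hkj : (k : Int) = j
    · have hjk : j.toNat = k := by omega
      rw [hset, hjk, List.count_cons]
      have hv : ∀ v : Int, (l.set k v).getD k 0 = v := by
        intro v
        rw [List.getD_eq_getElem?_getD, List.getElem?_set_self hk]
        rfl
      rw [hv]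
      have hbeq : (j == (k : Int)) = true := by simp [hkj]
      simp only [hbeq, if_true]
      push_cast
      ring
    · have hjk : j.toNat ≠ k := by omega
      rw [hset, List.count_cons]
      have hv : ∀ v : Int, (l.set j.toNat v).getD k 0 = l.getD k 0 := by
        intro v
        rw [List.getD_eq_getElem?_getD, List.getElem?_set_ne hjk, ← List.getD_eq_getElem?_getD]
      rw [hv]
      have hbeq : (j == (k : Int)) = false := by
        simp only [beq_eq_false_iff_ne, ne_eq]
        omega
      simp [hbeq]

theorem getD_foldl_outer (n : Int) (T : List Int) (hT : ∀ i ∈ T, 0 < i)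
    (l : List Int) (hl : l.length = (n + 1).toNat) (k : Nat) (hk : k < l.length) :
    (T.foldl (fun it i => (PySem.List.pyRange 1 (n + 1) i).foldl pvInc it) l).getD k 0
      = l.getD k 0 + (T.map (fun i => (((PySem.List.pyRange 1 (n + 1) i).count (k : Int)) : Int))).sum := by
  induction T generalizing l with
  | nil => simp
  | cons i T ih =>
    have hi : 0 < i := hT i (by simp)
    have hmem : ∀ j ∈ PySem.List.pyRange 1 (n + 1) i, 0 ≤ j ∧ j.toNat < l.length := by
      intro j hjmem
      rw [PySem.List.mem_pyRange_iff_of_pos hi] at hjmem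
      constructor
      · omega
      · rw [hl]; omega
    have hlen : ((PySem.List.pyRange 1 (n + 1) i).foldl pvInc l).length = l.length :=
      foldl_pvInc_length _ _
    rw [List.foldl_cons,
        ih (fun x hx => hT x (by simp [hx])) _ (by rw [hlen, hl]) (by omega),
        getD_foldl_pvInc _ _ hmem _ hk]
    simp [add_assoc]

theorem nodup_pyRange_pos (a b : Int) {s : Int} (hs : 0 < s) :
    (PySem.List.pyRange a b s).Nodup := by
  rw [PySem.List.pyRange_of_pos a b hs]
  refine List.Nodup.map ?_ (List.nodup_range)
  intro x y hxy
  have : (x : Int) = y := by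
    have := hxy
    nlinarith [this]
  exact_mod_cast this

theorem count_pyRange_pos (n : Int) (i : Int) (hi : 0 < i) (x : Int) :
    ((PySem.List.pyRange 1 (n + 1) i).count x : Int)
      = if 1 ≤ x ∧ x < n + 1 ∧ i ∣ x - 1 then 1 else 0 := by
  by_cases hx : x ∈ PySem.List.pyRange 1 (n + 1) i
  · rw [List.count_eq_one_of_mem (nodup_pyRange_pos 1 (n + 1) hi) hx]
    rw [PySem.List.mem_pyRange_iff_of_pos hi] at hx
    simp [hx.1, hx.2.1, hx.2.2]
  · rw [List.count_eq_zero_of_not_mem hx]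
    rw [PySem.List.mem_pyRange_iff_of_pos hi] at hx
    rw [not_and, not_and] at hx
    by_cases h1 : 1 ≤ x
    · by_cases h2 : x < n + 1
      · simp [h1, h2, hx h1 h2]
      · simp [h2]
    · simp [h1]

-- A's resulting array, entry by entry
theorem wrongSieve_getD (n : Int) (k : Nat) (hk : k < (n + 1).toNat) :
    (wrongSieve n).getD k 0
      = ((PySem.List.pyRange 1 (n + 1) 1).map
          (fun i => if 1 ≤ (k : Int) ∧ (k : Int) < n + 1 ∧ i ∣ (k : Int) - 1 then (1 : Int) else 0)).sum := by
  show ((PySem.List.pyRange 1 (n + 1) 1).foldl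
      (fun it i => (PySem.List.pyRange 1 (n + 1) i).foldl
        (fun it2 j => PySem.List.pySetD it2 j (PySem.List.pyGetD it2 j 0 + 1)) it)
      (List.replicate (n + 1).toNat 0)).getD k 0 = _
  have hbody : (fun (it : List Int) (i : Int) => (PySem.List.pyRange 1 (n + 1) i).foldl
        (fun it2 j => PySem.List.pySetD it2 j (PySem.List.pyGetD it2 j 0 + 1)) it)
      = fun it i => (PySem.List.pyRange 1 (n + 1) i).foldl pvInc it := rfl
  rw [hbody, getD_foldl_outer n _ (fun i hi => by
        rw [PySem.List.mem_pyRange_one] at hi; omega)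
      _ (by simp) k (by simpa using hk)]
  rw [List.getD_eq_getElem _ _ (by simpa using hk)]
  simp only [List.getElem_replicate, zero_add]
  apply congrArg
  apply List.map_congr_left
  intro i hi
  rw [PySem.List.mem_pyRange_one] at hi
  exact count_pyRange_pos n i (by omega) _

theorem foldl_outer_length (n : Int) (T : List Int) (l : List Int) :
    (T.foldl (fun it i => (PySem.List.pyRange 1 (n + 1) i).foldl pvInc it) l).length = l.length := by
  induction T generalizing l with
  | nil => rfl
  | cons i T ih => rw [List.foldl_cons, ih, foldl_pvInc_length]

theorem wrongSieve_length (n : Int) : (wrongSieve n).length = (n + 1).toNat := by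
  show ((PySem.List.pyRange 1 (n + 1) 1).foldl
      (fun it i => (PySem.List.pyRange 1 (n + 1) i).foldl
        (fun it2 j => PySem.List.pySetD it2 j (PySem.List.pyGetD it2 j 0 + 1)) it)
      (List.replicate (n + 1).toNat 0)).length = _
  rw [show (fun (it : List Int) (i : Int) => (PySem.List.pyRange 1 (n + 1) i).foldl
        (fun it2 j => PySem.List.pySetD it2 j (PySem.List.pyGetD it2 j 0 + 1)) it)
      = fun it i => (PySem.List.pyRange 1 (n + 1) i).foldl pvInc it from rfl]
  rw [foldl_outer_length]
  simp

-- countP of divisibility over range(1, n+1) is the divisor count, for 1 ≤ m ≤ n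
theorem countP_divisors (n : Int) (m : Nat) (hm : 1 ≤ m) (hmn : (m : Int) ≤ n) :
    (List.countP (fun i => decide (i ∣ (m : Int))) (PySem.List.pyRange 1 (n + 1) 1) : Int)
      = (m.divisors.card : Int) := by
  have hN : m ≤ n.toNat := by omega
  have hN1 : 1 ≤ n.toNat := by omega
  rw [PySem.List.pyRange_one, List.countP_map]
  have harg : ((n : Int) + 1 - 1).toNat = n.toNat := by omega
  rw [harg]
  have hfun : ((fun i => decide (i ∣ (m : Int))) ∘ (fun k : Nat => (1 : Int) + (k : Int)))
      = fun t : Nat => decide ((t + 1) ∣ m) := by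
    funext t
    simp only [Function.comp_apply]
    rw [decide_eq_decide]
    rw [show ((1 : Int) + (t : Int)) = (((t + 1 : Nat) : Int)) by push_cast; ring]
    exact Int.natCast_dvd_natCast
  rw [hfun]
  have hcnt : (List.range n.toNat).countP (fun t => decide ((t + 1) ∣ m))
      = ((Finset.range n.toNat).filter (fun t => (t + 1) ∣ m)).card := by
    simp [Finset.filter, Finset.range, Multiset.range, List.countP_eq_length_filter,
      Multiset.filter_coe]
  rw [hcnt]
  have hcard : ((Finset.range n.toNat).filter (fun t => (t + 1) ∣ m)).card = m.divisors.card := by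
    apply Finset.card_nbij' (i := fun t => t + 1) (j := fun d => d - 1)
    · intro t ht
      simp only [Finset.coe_filter, Set.mem_setOf_eq, Finset.mem_range] at ht
      simp only [Finset.mem_coe, Nat.mem_divisors]
      exact ⟨ht.2, by omega⟩
    · intro d hd
      simp only [Finset.mem_coe, Nat.mem_divisors] at hd
      have hd1 : 1 ≤ d := Nat.pos_of_dvd_of_pos hd.1 (by omega)
      have hdm : d ≤ m := Nat.le_of_dvd (by omega) hd.1
      simp only [Finset.coe_filter, Set.mem_setOf_eq, Finset.mem_range]
      constructor
      · omega
      · rw [show d - 1 + 1 = d by omega]; exact hd.1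
    · intro t _ ; simp
    · intro d hd
      simp only [Finset.mem_coe, Nat.mem_divisors] at hd
      have hd1 : 1 ≤ d := Nat.pos_of_dvd_of_pos hd.1 (by omega)
      simp only []
      omega
  rw [hcard]

-- the trial-division loop computed as a sum over k ∈ [i, sqrt m]
def pvG (m k : Nat) : Int := if m % k = 0 then (if k * k = m then 1 else 2) else 0

theorem divcountLoop_sum (m : Nat) : ∀ d i c, m + 1 - i = d → 1 ≤ i →
    divcountLoop m i c = c + ∑ k ∈ Finset.Ico i (Nat.sqrt m + 1), pvG m k := by
  intro d
  induction d with
  | zero =>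
    intro i c hd hi
    have hle : i ≤ i * i := Nat.le_mul_of_pos_left i (by omega)
    have h1 : ¬ i * i ≤ m := by omega
    rw [divcountLoop, dif_neg h1]
    have h2 : Nat.sqrt m + 1 ≤ i := by
      have := Nat.sqrt_le_self m
      omega
    rw [Finset.Ico_eq_empty (by omega), Finset.sum_empty]
    ring
  | succ d ih =>
    intro i c hd hi
    rw [divcountLoop]
    by_cases h : i * i ≤ m
    · rw [dif_pos h]
      have hle : i ≤ i * i := Nat.le_mul_of_pos_left i (by omega)
      rw [ih (i + 1) _ (by omega) (by omega)]
      have his : i ≤ Nat.sqrt m := Nat.le_sqrt.mpr h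
      rw [Finset.sum_eq_sum_Ico_succ_bot (Nat.lt_succ_of_le his) (pvG m)]
      unfold pvG
      split_ifs <;> ring
    · rw [dif_neg h]
      have h2 : ¬ i ≤ Nat.sqrt m := fun hc => h (Nat.le_sqrt.mp hc)
      rw [Finset.Ico_eq_empty (by omega), Finset.sum_empty]
      ring

theorem sum_pvG_eq_card (m : Nat) (hm : 1 ≤ m) :
    ∑ k ∈ Finset.Ico 1 (Nat.sqrt m + 1), pvG m k = (m.divisors.card : Int) := by
  have hpt : ∀ k ∈ Finset.Ico 1 (Nat.sqrt m + 1),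
      pvG m k = (if k ∣ m then (2 : Int) else 0) - (if k ∣ m ∧ k * k = m then (1 : Int) else 0) := by
    intro k hk
    unfold pvG
    by_cases h1 : m % k = 0
    · have hd : k ∣ m := Nat.dvd_iff_mod_eq_zero.mpr h1
      by_cases h3 : k * k = m <;> simp [h1, hd, h3]
    · have hd : ¬ k ∣ m := fun hc => h1 (Nat.dvd_iff_mod_eq_zero.mp hc)
      simp [h1, hd]
  rw [Finset.sum_congr rfl hpt, Finset.sum_sub_distrib, ← Finset.sum_filter, ← Finset.sum_filter]
  rw [Finset.sum_const, Finset.sum_const, nsmul_eq_mul, nsmul_eq_mul]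
  have e1 : (Finset.Ico 1 (Nat.sqrt m + 1)).filter (fun k => k ∣ m)
      = m.divisors.filter (fun k => k * k ≤ m) := by
    ext k
    simp only [Finset.mem_filter, Finset.mem_Ico, Nat.mem_divisors]
    constructor
    · rintro ⟨⟨hk1, hk2⟩, hdvd⟩
      exact ⟨⟨hdvd, by omega⟩, Nat.le_sqrt.mp (by omega)⟩
    · rintro ⟨⟨hdvd, _⟩, hsq⟩
      have hk1 : 0 < k := Nat.pos_of_dvd_of_pos hdvd (by omega)
      have := Nat.le_sqrt.mpr hsq
      exact ⟨⟨by omega, by omega⟩, hdvd⟩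
  have e2 : (Finset.Ico 1 (Nat.sqrt m + 1)).filter (fun k => k ∣ m ∧ k * k = m)
      = m.divisors.filter (fun k => k * k = m) := by
    ext k
    simp only [Finset.mem_filter, Finset.mem_Ico, Nat.mem_divisors]
    constructor
    · rintro ⟨⟨hk1, hk2⟩, hdvd, hsq⟩
      exact ⟨⟨hdvd, by omega⟩, hsq⟩
    · rintro ⟨⟨hdvd, _⟩, hsq⟩
      have hk1 : 0 < k := Nat.pos_of_dvd_of_pos hdvd (by omega)
      have := Nat.le_sqrt.mpr (le_of_eq hsq)
      exact ⟨⟨by omega, by omega⟩, hdvd, hsq⟩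
  rw [e1, e2]
  have e3 : (m.divisors.filter (fun k => m < k * k)).card
      = (m.divisors.filter (fun k => k * k < m)).card := by
    apply Finset.card_nbij' (i := fun k => m / k) (j := fun k => m / k)
    · intro k hk
      simp only [Finset.coe_filter, Set.mem_setOf_eq, Nat.mem_divisors] at hk ⊢
      obtain ⟨⟨hdvd, hne⟩, hlt⟩ := hk
      have hk1 : 0 < k := Nat.pos_of_dvd_of_pos hdvd (by omega)
      have heq : k * (m / k) = m := Nat.mul_div_cancel' hdvd
      have he1 : 0 < m / k := by
        rcases Nat.eq_zero_or_pos (m / k) with h0 | h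
        · rw [h0, Nat.mul_zero] at heq; omega
        · exact h
      refine ⟨⟨Nat.div_dvd_of_dvd hdvd, hne⟩, ?_⟩
      have hlt2 : m / k < k := by nlinarith
      nlinarith
    · intro k hk
      simp only [Finset.coe_filter, Set.mem_setOf_eq, Nat.mem_divisors] at hk ⊢
      obtain ⟨⟨hdvd, hne⟩, hlt⟩ := hk
      have hk1 : 0 < k := Nat.pos_of_dvd_of_pos hdvd (by omega)
      have heq : k * (m / k) = m := Nat.mul_div_cancel' hdvd
      have he1 : 0 < m / k := by
        rcases Nat.eq_zero_or_pos (m / k) with h0 | h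
        · rw [h0, Nat.mul_zero] at heq; omega
        · exact h
      refine ⟨⟨Nat.div_dvd_of_dvd hdvd, hne⟩, ?_⟩
      have hlt2 : k < m / k := by nlinarith
      nlinarith
    · intro k hk
      simp only [Finset.coe_filter, Set.mem_setOf_eq, Nat.mem_divisors] at hk
      exact Nat.div_div_self hk.1.1 (by omega)
    · intro k hk
      simp only [Finset.coe_filter, Set.mem_setOf_eq, Nat.mem_divisors] at hk
      exact Nat.div_div_self hk.1.1 (by omega)
  have q1 : (m.divisors.filter (fun k => k * k ≤ m)).filter (fun k => k * k = m)
      = m.divisors.filter (fun k => k * k = m) := by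
    ext k
    simp only [Finset.mem_filter]
    exact ⟨fun ⟨⟨ha, _⟩, hc⟩ => ⟨ha, hc⟩, fun ⟨ha, hc⟩ => ⟨⟨ha, le_of_eq hc⟩, hc⟩⟩
  have q2 : (m.divisors.filter (fun k => k * k ≤ m)).filter (fun k => ¬ k * k = m)
      = m.divisors.filter (fun k => k * k < m) := by
    ext k
    simp only [Finset.mem_filter]
    exact ⟨fun ⟨⟨ha, hb⟩, hc⟩ => ⟨ha, lt_of_le_of_ne hb hc⟩,
      fun ⟨ha, hb⟩ => ⟨⟨ha, le_of_lt hb⟩, ne_of_lt hb⟩⟩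
  have q3 : m.divisors.filter (fun k => ¬ k * k ≤ m) = m.divisors.filter (fun k => m < k * k) := by
    ext k
    simp only [Finset.mem_filter, Nat.not_le]
  have p1 := Finset.card_filter_add_card_filter_not
    (s := m.divisors) (p := fun k => k * k ≤ m)
  have p2 := Finset.card_filter_add_card_filter_not
    (s := m.divisors.filter (fun k => k * k ≤ m)) (p := fun k => k * k = m)
  rw [q1, q2] at p2
  rw [q3] at p1
  rw [← e3] at p2
  omega

theorem divcountLoop_eq (m : Nat) (hm : 1 ≤ m) :
    divcountLoop m 1 0 = (m.divisors.card : Int) := by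
  rw [divcountLoop_sum m (m + 1 - 1) 1 0 rfl le_rfl, sum_pvG_eq_card m hm]
  ring

-- ===== VERDICT (by name: the statement is the Claim_ definition above) =====
theorem wrongSieve_spec : Claim_equal_wrongSieve := by
  intro n _hdom
  unfold Spec_wrongSieve
  by_cases hn : n < 1
  · unfold wrongSieve_alt
    rw [if_pos hn]
    show ((PySem.List.pyRange 1 (n + 1) 1).foldl _ (List.replicate (n + 1).toNat 0)) = _
    rw [PySem.List.pyRange_one_eq_nil (by omega), List.foldl_nil]
  · have hn1 : 1 ≤ n := by omega
    have halt : wrongSieve_alt n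
        = [0, n] ++ (List.range' 1 (n - 1).toNat).map (fun m => divcountLoop m 1 0) := by
      unfold wrongSieve_alt
      rw [if_neg hn]
    rw [halt]
    apply List.ext_getElem
    · rw [wrongSieve_length]
      simp only [List.length_append, List.length_map, List.length_range', List.length_cons,
        List.length_nil]
      omega
    · intro k hk1 hk2
      have hkn : k < (n + 1).toNat := by rw [wrongSieve_length] at hk1; exact hk1
      rw [← List.getD_eq_getElem (wrongSieve n) 0 hk1, wrongSieve_getD n k hkn]
      by_cases hk0 : k = 0
      · subst hk0
        rw [List.getElem_append_left (by simp)]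
        simp
      by_cases hke : k = 1
      · subst hke
        rw [List.getElem_append_left (by simp)]
        have hc : ∀ i ∈ PySem.List.pyRange 1 (n + 1) 1,
            (if 1 ≤ ((1 : Nat) : Int) ∧ ((1 : Nat) : Int) < n + 1 ∧ i ∣ ((1 : Nat) : Int) - 1
              then (1 : Int) else 0) = 1 := by
          intro i _
          rw [if_pos]
          refine ⟨by norm_num, by push_cast; omega, by norm_num⟩
        rw [List.map_congr_left hc]
        rw [PySem.List.sum_map_const_int, PySem.List.length_pyRange_one]
        show ((((n : Int) + 1 - 1).toNat : Int)) * 1 = n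
        omega
      · obtain ⟨k, rfl⟩ : ∃ k', k = k' + 2 := ⟨k - 2, by omega⟩
        have hm1 : (1 : Nat) ≤ k + 1 := by omega
        have hmn : ((k + 1 : Nat) : Int) ≤ n := by omega
        have hc : ∀ i ∈ PySem.List.pyRange 1 (n + 1) 1,
            (if 1 ≤ ((k + 2 : Nat) : Int) ∧ ((k + 2 : Nat) : Int) < n + 1 ∧
                i ∣ ((k + 2 : Nat) : Int) - 1 then (1 : Int) else 0)
            = if (fun i => decide (i ∣ ((k + 1 : Nat) : Int))) i = true then 1 else 0 := by
          intro i _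
          have h12 : (1 : Int) ≤ ((k + 2 : Nat) : Int) ∧ ((k + 2 : Nat) : Int) < n + 1 := by
            constructor <;> [push_cast; skip] <;> omega
          have harg : ((k + 2 : Nat) : Int) - 1 = ((k + 1 : Nat) : Int) := by push_cast; ring
          rw [harg]
          by_cases hdvd : i ∣ ((k + 1 : Nat) : Int)
          · rw [if_pos ⟨h12.1, h12.2, hdvd⟩, if_pos (by simpa using hdvd)]
          · rw [if_neg (by tauto), if_neg (by simpa using hdvd)]
        rw [List.map_congr_left hc, PySem.List.sum_map_ite_one_zero,
            countP_divisors n (k + 1) hm1 hmn, ← divcountLoop_eq (k + 1) hm1]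
        rw [List.getElem_append_right (by simp)]
        rw [List.getElem_map, List.getElem_range']
        norm_num
        rw [show 1 + k = k + 1 from Nat.add_comm 1 k]
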